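-- pv_equiv track=rewrite | github.com/akkerman/advent_of_code | 2019/12.py | part_two
-- ===== SOURCE A (Python) =====
-- import math
--
-- Position = list[int]
--
-- def signum(x: int, y: int) -> int:
--     """Return the sign of y - x."""
--     return (y > x) - (y < x)
--
-- def apply_component(positions: list[int], velocities: list[int]):
--     """Apply 1 step of gravity and velocity to one of the components of all planets."""
--     length = len(positions)
--     new_velocities = velocities.copy()
--     for x in range(length):
--         new_velocities[x] += sum(signum(positions[x], positions[y]) for y in range(length) if x!=y)
--     velocities = new_velocities
--     return [p+v for p,v in zip(positions, velocities)], new_velocities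
--
-- def component_repeats(positions: list[int]) -> int:
--     """Figure out when the same x,y or z position, including velocity repeats."""
--     velocities = [0] * len(positions)
--     history = {tuple(positions + velocities)}
--
--     while True:
--         positions, velocities = apply_component(positions, velocities)
--         vector = tuple(positions + velocities)
--         if vector in history:
--             return len(history)
--         history.add(vector)
--
-- def part_two(positions: list[Position]) -> int:
--     """Find the number of steps it takes before the universe repeats."""
--     xs = [p[0] for p in positions]
--     ys = [p[1] for p in positions]
--     zs = [p[2] for p in positions]
--
--     repeat_xs = component_repeats(xs)
--     repeat_ys = component_repeats(ys)
--     repeat_zs = component_repeats(zs)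
--     return math.lcm(repeat_xs, repeat_ys, repeat_zs)
-- ===== SOURCE B (Python) =====
-- import math
--
-- def part_two(positions):
--     """Find the number of steps it takes before the universe repeats.
--
--     Keeps O(1) state: no history set -- by reversibility the first repeated
--     state is the initial one, so we just count steps until we are back at the
--     start with all velocities zero, and fold the per-axis cycle lengths into
--     an lcm as we go.
--     """
--     result = 1
--     for axis in range(3):
--         start = [p[axis] for p in positions]
--         pos = list(start)
--         vel = [0] * len(pos)
--         steps = 0
--         while True:
--             vel = [w + sum(1 for q in pos if q > x) - sum(1 for q in pos if q < x)
--                    for x, w in zip(pos, vel)]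
--             pos = [x + w for x, w in zip(pos, vel)]
--             steps += 1
--             if pos == start and not any(vel):
--                 result = math.lcm(result, steps)
--                 break
--     return result
-- ===== Notes on version B (the rewrite author's own statement) =====
-- stated objective: simpler
-- what changed: B drops the growing history set entirely: since the step map is invertible the first repeated state is the initial one, so B just counts steps until positions return to the start with all velocities zero (O(1) state instead of an O(period) set), computes each velocity change by counting greater/smaller positions instead of an indexed setitem loop over a copied list, and folds the three axis cycle lengths into a running lcm instead of three named extractions.
import Mathlib
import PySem

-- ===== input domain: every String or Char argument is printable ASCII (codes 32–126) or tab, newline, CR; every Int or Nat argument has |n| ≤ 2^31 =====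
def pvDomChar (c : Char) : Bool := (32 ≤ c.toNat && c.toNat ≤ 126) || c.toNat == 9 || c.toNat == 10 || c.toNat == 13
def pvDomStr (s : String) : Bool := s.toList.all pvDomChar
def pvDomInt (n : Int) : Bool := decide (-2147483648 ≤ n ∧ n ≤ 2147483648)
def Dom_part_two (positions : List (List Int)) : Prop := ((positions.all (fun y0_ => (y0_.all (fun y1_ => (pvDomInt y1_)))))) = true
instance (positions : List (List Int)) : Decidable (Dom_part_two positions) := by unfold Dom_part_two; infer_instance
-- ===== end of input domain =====

-- B replaces A's growing history set by an O(1)-state return-to-origin check (the step map is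
-- invertible, so the first repeated state is the initial one), counts greater/smaller positions
-- instead of A's indexed setitem loop, and folds the three axis cycles into a running lcm.
-- Both while-loops carry a fuel argument purely as a totality guard (same fuel on both sides).

def pvFuel : Nat := 2 ^ 63

-- ===== PORT A =====
def signum (x y : Int) : Int := (if x < y then (1 : Int) else 0) - (if y < x then (1 : Int) else 0)

def apply_component (positions velocities : List Int) : List Int × List Int :=
  let length : Int := (positions.length : Int)
  let new_velocities : List Int :=
    (PySem.List.pyRange 0 length 1).foldl
      (fun nv x => PySem.List.pySetD nv x (PySem.List.pyGetD nv x 0 +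
        (((PySem.List.pyRange 0 length 1).filter (fun y => !(x == y))).map
          (fun y => signum (PySem.List.pyGetD positions x 0) (PySem.List.pyGetD positions y 0))).sum))
      velocities
  ((positions.zip new_velocities).map (fun pv => pv.1 + pv.2), new_velocities)

def componentGo (fuel : Nat) (positions velocities : List Int) (history : PySem.Set (List Int)) : Int :=
  match fuel with
  | 0 => PySem.Set.len history          -- fuel guard only; never reached when the loop finds its repeat
  | f + 1 =>
    let pv := apply_component positions velocities
    let vector := pv.1 ++ pv.2
    if PySem.Set.contains history vector then PySem.Set.len history
    else componentGo f pv.1 pv.2 (PySem.Set.add history vector)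

def component_repeats (positions : List Int) : Int :=
  let velocities := List.replicate positions.length (0 : Int)
  componentGo pvFuel positions velocities (PySem.Set.ofList [positions ++ velocities])

def part_two (positions : List (List Int)) : Int :=
  let xs := positions.map (fun p => PySem.List.pyGetD p 0 0)
  let ys := positions.map (fun p => PySem.List.pyGetD p 1 0)
  let zs := positions.map (fun p => PySem.List.pyGetD p 2 0)
  let repeat_xs := component_repeats xs
  let repeat_ys := component_repeats ys
  let repeat_zs := component_repeats zs
  ((Int.lcm ((Int.lcm repeat_xs repeat_ys : Nat) : Int) repeat_zs : Nat) : Int)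

-- ===== PORT B =====
def cycleGo (fuel : Nat) (start pos vel : List Int) (steps : Int) : Int :=
  match fuel with
  | 0 => steps + 1                      -- fuel guard only; never reached when the loop finds its repeat
  | f + 1 =>
    let vel' := (pos.zip vel).map (fun xw =>
      xw.2 + ((pos.filter (fun q => xw.1 < q)).map (fun _ => (1 : Int))).sum
           - ((pos.filter (fun q => q < xw.1)).map (fun _ => (1 : Int))).sum)
    let pos' := (pos.zip vel').map (fun xw => xw.1 + xw.2)
    let steps' := steps + 1
    if pos' == start && vel'.all (fun w => w == 0) then steps'
    else cycleGo f start pos' vel' steps'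

def part_two_alt (positions : List (List Int)) : Int :=
  (PySem.List.pyRange 0 3 1).foldl
    (fun result axis =>
      let start := positions.map (fun p => PySem.List.pyGetD p axis 0)
      ((Int.lcm result (cycleGo pvFuel start start (List.replicate start.length (0 : Int)) 0) : Nat) : Int))
    1

-- ===== PRECONDITION & SPEC =====
-- Pre_ excludes exactly the inputs where the Python A raises IndexError: a row shorter than 3,
-- on which the x/y/z extractions p[0], p[1], p[2] fail.
def Pre_part_two (positions : List (List Int)) : Prop := ∀ p ∈ positions, 3 ≤ p.length
instance (positions : List (List Int)) : Decidable (Pre_part_two positions) := by unfold Pre_part_two; infer_instance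

def pvWitness_part_two : List (List Int) := [[1, 2, 3], [-2, 0, 5]]

def Spec_part_two (positions : List (List Int)) (out : Int) : Prop := out = part_two_alt positions
instance (positions : List (List Int)) (out : Int) : Decidable (Spec_part_two positions out) := by unfold Spec_part_two; infer_instance

-- ===== CLAIM (what is proved, stated in full; the proofs are below) =====
def Claim_equal_part_two : Prop := ∀ (positions : List (List Int)), Dom_part_two positions → Pre_part_two positions → Spec_part_two positions (part_two positions)

-- ===== LEMMAS AND PROOFS =====

-- abstract characterisation of one simulation step (shared target of both ports)
def gval (p : List Int) (x : Int) : Int :=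
  ((p.countP (fun q => x < q)) : Int) - ((p.countP (fun q => q < x)) : Int)

def stepVel (p v : List Int) : List Int := (p.zip v).map (fun xw => xw.2 + gval p xw.1)

def stepAbs (s : List Int × List Int) : List Int × List Int :=
  (((s.1.zip (stepVel s.1 s.2)).map (fun xw => xw.1 + xw.2)), stepVel s.1 s.2)

def encS (s : List Int × List Int) : List Int := s.1 ++ s.2

def iterS (p0 : List Int) (k : Nat) : List Int × List Int :=
  stepAbs^[k] (p0, List.replicate p0.length (0 : Int))


lemma map_zip_eq_zipWith (f : Int → Int → Int) (l m : List Int) :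
    (l.zip m).map (fun xw => f xw.1 xw.2) = List.zipWith f l m := by
  induction l generalizing m with
  | nil => simp
  | cons a t ih =>
    cases m with
    | nil => simp
    | cons b u => simp [ih]

lemma foldl_setD (F : Int → Int) (u : List Int) :
    ∀ (k : Nat), k ≤ u.length →
      (PySem.List.pyRange 0 (k : Int) 1).foldl
        (fun nv x => PySem.List.pySetD nv x (PySem.List.pyGetD nv x 0 + F x)) u
      = (List.range k).map (fun i => u.getD i 0 + F (i : Int)) ++ u.drop k := by
  intro k
  induction k with
  | zero => intro _; simp [PySem.List.pyRange_one_eq_nil (le_refl (0 : Int))]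
  | succ k ih =>
    intro hk
    have hk' : k ≤ u.length := by omega
    have hkl : k < u.length := by omega
    have hcast : ((k + 1 : Nat) : Int) = (k : Int) + 1 := by push_cast; ring
    rw [hcast, PySem.List.pyRange_one_succ_right (by positivity), List.foldl_append, ih hk']
    set c := (List.range k).map (fun i => u.getD i 0 + F (i : Int)) ++ u.drop k with hc
    have hlc : c.length = u.length := by simp [hc]; omega
    have hmlen : ((List.range k).map (fun i => u.getD i 0 + F (i : Int))).length = k := by simp
    have hget : PySem.List.pyGetD c (k : Int) 0 = u[k] := by
      rw [PySem.List.pyGetD_natCast, List.getD_eq_getElem c 0 (by omega)]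
      rw [List.getElem_append_right (by omega)]
      simp only [hmlen, Nat.sub_self, List.getElem_drop, Nat.add_zero]
    have hset : ∀ w : Int, PySem.List.pySetD c (k : Int) w = c.set k w := by
      intro w
      simp [PySem.List.pySetD, PySem.List.pySet?_natCast c k w (by omega)]
    simp only [List.foldl_cons, List.foldl_nil, hget, hset]
    rw [hc, List.set_append_right _ _ (by simp), hmlen]
    rw [List.drop_eq_getElem_cons hkl]
    simp only [Nat.sub_self, List.set_cons_zero]
    rw [List.range_succ, List.map_append, List.append_assoc]
    simp [List.getD, List.getElem?_eq_getElem hkl]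

lemma sum_map_signum (px : Int) (p : List Int) :
    (p.map (fun q => signum px q)).sum = gval p px := by
  unfold gval
  induction p with
  | nil => simp
  | cons a t ih =>
    rw [List.map_cons, List.sum_cons, ih]
    simp only [List.countP_cons, signum]
    by_cases h1 : px < a <;> by_cases h2 : a < px <;>
      simp [h1, h2] <;> omega

lemma F_char (p : List Int) (i : Nat) (hi : i < p.length) :
    (((PySem.List.pyRange 0 (p.length : Int) 1).filter (fun y => !((i : Int) == y))).map
        (fun y => signum (PySem.List.pyGetD p (i : Int) 0) (PySem.List.pyGetD p y 0))).sum
      = gval p (p[i]) := by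
  have hpx : PySem.List.pyGetD p (i : Int) 0 = p[i] := by
    rw [PySem.List.pyGetD_natCast, List.getD_eq_getElem p 0 hi]
  set px := p[i] with hpxdef
  set f : Int → Int := fun y => signum px (PySem.List.pyGetD p y 0) with hf
  have hsplit : PySem.List.pyRange 0 (p.length : Int) 1
      = PySem.List.pyRange 0 (i : Int) 1 ++ [(i : Int)] ++ PySem.List.pyRange ((i : Int) + 1) (p.length : Int) 1 := by
    rw [PySem.List.pyRange_one_append 0 (i : Int) (p.length : Int) (by positivity) (by exact_mod_cast hi.le)]
    rw [PySem.List.pyRange_one_append (i : Int) ((i : Int) + 1) (p.length : Int) (by omega) (by exact_mod_cast hi)]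
    rw [PySem.List.pyRange_one_singleton, List.append_assoc]
  have hfilter_left : (PySem.List.pyRange 0 (i : Int) 1).filter (fun y => !((i : Int) == y))
      = PySem.List.pyRange 0 (i : Int) 1 := by
    apply List.filter_eq_self.mpr
    intro y hy
    have := PySem.List.mem_pyRange_one.1 hy
    simp; omega
  have hfilter_right : (PySem.List.pyRange ((i : Int) + 1) (p.length : Int) 1).filter (fun y => !((i : Int) == y))
      = PySem.List.pyRange ((i : Int) + 1) (p.length : Int) 1 := by
    apply List.filter_eq_self.mpr
    intro y hy
    have := PySem.List.mem_pyRange_one.1 hy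
    simp; omega
  have hfi : f (i : Int) = 0 := by
    simp [hf, hpx, signum]
  have hfull : ((PySem.List.pyRange 0 (p.length : Int) 1).map f).sum
      = (((PySem.List.pyRange 0 (p.length : Int) 1).filter (fun y => !((i : Int) == y))).map f).sum := by
    rw [hsplit]
    simp [List.filter_append, hfilter_left, hfilter_right, hfi]
  rw [hpx, ← hf, ← hfull]
  have hmm : (PySem.List.pyRange 0 (p.length : Int) 1).map f
      = ((PySem.List.pyRange 0 (p.length : Int) 1).map (fun j => PySem.List.pyGetD p j 0)).map
          (fun q => signum px q) := by
    rw [List.map_map]; rfl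
  rw [hmm, PySem.List.map_pyGetD_pyRange_zero', sum_map_signum]

lemma sum_ones_filter (p : List Int) (pr : Int → Bool) :
    ((p.filter pr).map (fun _ => (1 : Int))).sum = ((p.countP pr : Nat) : Int) := by
  have hconst : ∀ m : List Int, (m.map (fun _ => (1 : Int))).sum = (m.length : Int) := by
    intro m; induction m with
    | nil => simp
    | cons a t ih => rw [List.map_cons, List.sum_cons, ih, List.length_cons]; push_cast; ring
  rw [hconst, List.countP_eq_length_filter]

lemma lengths_stepAbs (p v : List Int) (h : v.length = p.length) :
    (stepAbs (p, v)).1.length = p.length ∧ (stepAbs (p, v)).2.length = p.length := by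
  simp [stepAbs, stepVel, h]

lemma lengths_iterS (p0 : List Int) (k : Nat) :
    (iterS p0 k).1.length = p0.length ∧ (iterS p0 k).2.length = p0.length := by
  induction k with
  | zero => simp [iterS]
  | succ k ih =>
    have h : iterS p0 (k + 1) = stepAbs ((iterS p0 k).1, (iterS p0 k).2) := by
      simp [iterS, Function.iterate_succ_apply']
    rw [h]
    have := lengths_stepAbs (iterS p0 k).1 (iterS p0 k).2 (ih.2.trans ih.1.symm)
    exact ⟨this.1.trans ih.1, this.2.trans ih.1⟩

lemma applyA_eq (p v : List Int) (h : v.length = p.length) :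
    apply_component p v = stepAbs (p, v) := by
  have hsv : stepVel p v = List.zipWith (fun a b => b + gval p a) p v := by
    unfold stepVel; exact map_zip_eq_zipWith (fun a b => b + gval p a) p v
  have hNV : (PySem.List.pyRange 0 ((p.length : Int)) 1).foldl
      (fun nv x => PySem.List.pySetD nv x (PySem.List.pyGetD nv x 0 +
        (((PySem.List.pyRange 0 ((p.length : Int)) 1).filter (fun y => !(x == y))).map
          (fun y => signum (PySem.List.pyGetD p x 0) (PySem.List.pyGetD p y 0))).sum)) v
      = stepVel p v := by
    have hcast : ((p.length : Nat) : Int) = ((v.length : Nat) : Int) := by exact_mod_cast h.symm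
    rw [hcast, foldl_setD _ v v.length le_rfl, List.drop_length, List.append_nil, hsv]
    apply List.ext_getElem
    · simp [h]
    · intro i hi1 hi2
      simp only [List.getElem_map, List.getElem_range, List.getElem_zipWith]
      have hiv : i < v.length := by simpa using hi1
      have hip : i < p.length := by omega
      rw [List.getD_eq_getElem v 0 hiv, ← hcast, F_char p i hip]
  unfold apply_component
  simp only [hNV]
  unfold stepAbs
  rfl

lemma stepAbs_inj (p1 v1 p2 v2 : List Int) (h1 : v1.length = p1.length)
    (h2 : v2.length = p2.length) (h : stepAbs (p1, v1) = stepAbs (p2, v2)) :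
    p1 = p2 ∧ v1 = v2 := by
  have hsnd : stepVel p1 v1 = stepVel p2 v2 := congrArg Prod.snd h
  have hw1 : (stepVel p1 v1).length = p1.length := by simp [stepVel, h1]
  have hw2 : (stepVel p2 v2).length = p2.length := by simp [stepVel, h2]
  have hn : p1.length = p2.length := by rw [← hw1, hsnd, hw2]
  have hfst : List.zipWith (fun a b : Int => a + b) p1 (stepVel p1 v1)
      = List.zipWith (fun a b : Int => a + b) p2 (stepVel p2 v2) := by
    have hft := congrArg Prod.fst h
    simp only [stepAbs] at hft
    rw [map_zip_eq_zipWith (fun a b => a + b) p1, map_zip_eq_zipWith (fun a b => a + b) p2] at hft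
    exact hft
  rw [← hsnd] at hfst
  have hp : p1 = p2 := by
    apply List.ext_getElem hn
    intro i hi1 hi2
    have hb1 : i < (List.zipWith (fun a b : Int => a + b) p1 (stepVel p1 v1)).length := by
      simp only [List.length_zipWith, hw1]; omega
    have he := List.getElem_of_eq hfst hb1
    rw [List.getElem_zipWith, List.getElem_zipWith] at he
    exact add_right_cancel he
  subst hp
  refine ⟨rfl, ?_⟩
  apply List.ext_getElem (by omega : v1.length = v2.length)
  intro i hi1 hi2
  have hb : i < (stepVel p1 v1).length := by rw [hw1]; omega
  have he := List.getElem_of_eq hsnd hb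
  unfold stepVel at he
  rw [List.getElem_map, List.getElem_map, List.getElem_zip, List.getElem_zip] at he
  exact add_right_cancel he

lemma encS_inj (s t : List Int × List Int) (h1 : s.1.length = t.1.length)
    (h : encS s = encS t) : s = t := by
  obtain ⟨h1', h2'⟩ := List.append_inj h h1
  exact Prod.ext h1' h2' 

lemma iterS_succ (p0 : List Int) (k : Nat) : iterS p0 (k + 1) = stepAbs (iterS p0 k) := by
  simp [iterS, Function.iterate_succ_apply']

lemma stepB_eq (p v : List Int) :
    (p.zip v).map (fun xw =>
      xw.2 + ((p.filter (fun q => xw.1 < q)).map (fun _ => (1 : Int))).sum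
           - ((p.filter (fun q => q < xw.1)).map (fun _ => (1 : Int))).sum) = stepVel p v := by
  unfold stepVel
  refine List.map_congr_left (fun xw _ => ?_)
  rw [sum_ones_filter, sum_ones_filter]
  unfold gval
  ring

lemma loop_eq (p0 : List Int) :
    ∀ (f k : Nat) (hist : PySem.Set (List Int)),
      (∀ x, x ∈ hist ↔ ∃ j ≤ k, x = encS (iterS p0 j)) →
      hist.length = k + 1 →
      (∀ i j, i ≤ k → j ≤ k → iterS p0 i = iterS p0 j → i = j) →
      componentGo f (iterS p0 k).1 (iterS p0 k).2 hist
        = cycleGo f p0 (iterS p0 k).1 (iterS p0 k).2 (k : Int) := by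
  intro f
  induction f with
  | zero =>
    intro k hist _ hlen _
    simp only [componentGo, cycleGo, PySem.Set.len, hlen]
    push_cast
    ring
  | succ f ih =>
    intro k hist hmem hlen hinj
    have hL := lengths_iterS p0 k
    have hL1 := lengths_iterS p0 (k + 1)
    have hvp : (iterS p0 k).2.length = (iterS p0 k).1.length := hL.2.trans hL.1.symm
    have hstep : apply_component (iterS p0 k).1 (iterS p0 k).2 = iterS p0 (k + 1) := by
      rw [applyA_eq _ _ hvp, Prod.mk.eta, ← iterS_succ]
    have hv2 : stepVel (iterS p0 k).1 (iterS p0 k).2 = (iterS p0 (k + 1)).2 := by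
      rw [iterS_succ]; rfl
    have hv1 : ((iterS p0 k).1.zip (iterS p0 (k + 1)).2).map (fun xw => xw.1 + xw.2)
        = (iterS p0 (k + 1)).1 := by
      rw [iterS_succ]; rfl
    simp only [componentGo, cycleGo, hstep, stepB_eq, hv2, hv1]
    by_cases hc : encS (iterS p0 (k + 1)) ∈ hist
    · -- the state repeats: by injectivity it must be the initial state
      obtain ⟨j, hj, hx⟩ := (hmem _).1 hc
      have hxeq : iterS p0 (k + 1) = iterS p0 j :=
        encS_inj _ _ (hL1.1.trans (lengths_iterS p0 j).1.symm) hx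
      have hj0 : j = 0 := by
        by_contra hne
        obtain ⟨j', rfl⟩ : ∃ j', j = j' + 1 := ⟨j - 1, by omega⟩
        have hpair : stepAbs ((iterS p0 k).1, (iterS p0 k).2)
            = stepAbs ((iterS p0 j').1, (iterS p0 j').2) := by
          rw [Prod.mk.eta, Prod.mk.eta, ← iterS_succ, ← iterS_succ, hxeq]
        obtain ⟨hpp, hvv⟩ := stepAbs_inj _ _ _ _ hvp
          ((lengths_iterS p0 j').2.trans (lengths_iterS p0 j').1.symm) hpair
        have hkj : k = j' := by
          exact hinj k j' le_rfl (by omega) (Prod.ext hpp hvv)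
        omega
      subst hj0
      have hs0 : iterS p0 (k + 1) = (p0, List.replicate p0.length (0 : Int)) := hxeq
      have hcontains : PySem.Set.contains hist ((iterS p0 (k + 1)).1 ++ (iterS p0 (k + 1)).2) = true :=
        (PySem.Set.contains_iff _ _).2 hc
      rw [if_pos hcontains]
      have hbcond : ((iterS p0 (k + 1)).1 == p0 && (iterS p0 (k + 1)).2.all (fun w => w == 0)) = true := by
        rw [hs0]
        simp
      rw [if_pos hbcond]
      simp only [PySem.Set.len, hlen]
      push_cast
      ring
    · -- fresh state: both loops continue
      have hcontains : PySem.Set.contains hist ((iterS p0 (k + 1)).1 ++ (iterS p0 (k + 1)).2) = false := by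
        rw [Bool.eq_false_iff]
        intro habs
        exact hc ((PySem.Set.contains_iff _ _).1 habs)
      rw [if_neg (by rw [hcontains]; simp)]
      have hbcond : ¬(((iterS p0 (k + 1)).1 == p0 && (iterS p0 (k + 1)).2.all (fun w => w == 0)) = true) := by
        intro habs
        rw [Bool.and_eq_true, beq_iff_eq, List.all_eq_true] at habs
        have hrep : (iterS p0 (k + 1)).2 = List.replicate p0.length (0 : Int) := by
          rw [List.eq_replicate_iff]
          refine ⟨hL1.2, fun b hb => by simpa using habs.2 b hb⟩
        have hzero : iterS p0 (k + 1) = iterS p0 0 := Prod.ext habs.1 hrep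
        exact hc ((hmem _).2 ⟨0, by omega, congrArg encS hzero⟩)
      rw [if_neg hbcond]
      have hadd : PySem.Set.add hist (encS (iterS p0 (k + 1))) = hist ++ [encS (iterS p0 (k + 1))] := by
        unfold PySem.Set.add
        rw [show PySem.Set.contains hist (encS (iterS p0 (k + 1))) = false from hcontains, if_neg (by simp)]
      have hrec := ih (k + 1) (PySem.Set.add hist (encS (iterS p0 (k + 1))))
        (by
          intro x
          rw [PySem.Set.mem_add, hmem x]
          constructor
          · rintro (⟨j, hj, hx⟩ | hx)
            · exact ⟨j, by omega, hx⟩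
            · exact ⟨k + 1, le_rfl, hx⟩
          · rintro ⟨j, hj, hx⟩
            by_cases hjk : j ≤ k
            · exact Or.inl ⟨j, hjk, hx⟩
            · have : j = k + 1 := by omega
              subst this
              exact Or.inr hx)
        (by rw [hadd, List.length_append, hlen]; rfl)
        (by
          intro i j hi hj heq
          by_cases hik : i ≤ k <;> by_cases hjk : j ≤ k
          · exact hinj i j hik hjk heq
          · have hj1 : j = k + 1 := by omega
            subst hj1
            exact absurd ((hmem _).2 ⟨i, hik, congrArg encS heq.symm⟩) hc
          · have hi1 : i = k + 1 := by omega
            subst hi1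
            exact absurd ((hmem _).2 ⟨j, hjk, congrArg encS heq⟩) hc
          · omega)
      have hcast : ((k : Int) + 1) = (((k + 1 : Nat) : Nat) : Int) := by push_cast; ring
      rw [hcast]
      exact hrec

lemma comp_eq (p0 : List Int) :
    component_repeats p0 = cycleGo pvFuel p0 p0 (List.replicate p0.length (0 : Int)) 0 := by
  have h0 : iterS p0 0 = (p0, List.replicate p0.length (0 : Int)) := rfl
  have := loop_eq p0 pvFuel 0 [encS (iterS p0 0)]
    (by
      intro x
      simp only [List.mem_singleton]
      constructor
      · intro hx; exact ⟨0, le_rfl, hx⟩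
      · rintro ⟨j, hj, hx⟩
        have : j = 0 := by omega
        subst this
        exact hx)
    (by simp)
    (by intro i j hi hj _; omega)
  rw [h0] at this
  unfold component_repeats
  simpa [encS, h0] using this

-- ===== VERDICT (by name: the statement is the Claim_ definition above) =====
theorem part_two_spec : Claim_equal_part_two := by
  intro positions _ _
  unfold Spec_part_two part_two part_two_alt
  have h3 : PySem.List.pyRange 0 3 1 = [0, 1, 2] := by decide
  rw [h3]
  simp only [List.foldl_cons, List.foldl_nil]
  rw [comp_eq, comp_eq, comp_eq]
  simp [Int.lcm, Nat.lcm_one_left, Int.natAbs_abs]
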